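-- pv_equiv track=rewrite | github.com/tilelabsapps/pyemberstore | src/pyemberstore/grpc_emulator.py | _split_field_path
-- ===== SOURCE A (Python) =====
-- def _split_field_path(dotted_path: str) -> list[str]:
--     """Split a Firestore field path on unescaped dots, stripping backtick wrappers.
--
--     The Firestore SDK wraps field names that are not valid JS identifiers (e.g.
--     those starting with a digit) in backticks when building gRPC FieldMasks.
--     A naive split(".") would keep the backtick characters as part of the key.
--     """
--     parts: list[str] = []
--     current: list[str] = []
--     in_backtick = False
--     for ch in dotted_path:
--         if ch == "`":
--             in_backtick = not in_backtick
--         elif ch == "." and not in_backtick: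
--             parts.append("".join(current))
--             current = []
--         else:
--             current.append(ch)
--     parts.append("".join(current))
--     return parts
-- ===== SOURCE B (Python) =====
-- def _split_field_path(dotted_path: str) -> list[str]:
--     parts: list[str] = []
--     current = ""
--     # split("`") alternates: even-index segments are outside backticks, odd ones inside
--     for i, seg in enumerate(dotted_path.split("`")):
--         if i % 2 == 1:
--             current += seg  # dots inside backticks are literal
--         else:
--             pieces = seg.split(".")
--             current += pieces[0]
--             for piece in pieces[1:]:
--                 parts.append(current)
--                 current = piece
--     parts.append(current)
--     return parts
-- ===== Notes on version B (the rewrite author's own statement) =====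
-- stated objective: faster
-- what changed: A scans char-by-char with an in_backtick flag; B instead splits the string on backticks (odd segments are inside backticks, taken literally), splits the even segments on dots, and stitches the pieces across segment boundaries, doing the scanning in C-level str.split.
import Mathlib
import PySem

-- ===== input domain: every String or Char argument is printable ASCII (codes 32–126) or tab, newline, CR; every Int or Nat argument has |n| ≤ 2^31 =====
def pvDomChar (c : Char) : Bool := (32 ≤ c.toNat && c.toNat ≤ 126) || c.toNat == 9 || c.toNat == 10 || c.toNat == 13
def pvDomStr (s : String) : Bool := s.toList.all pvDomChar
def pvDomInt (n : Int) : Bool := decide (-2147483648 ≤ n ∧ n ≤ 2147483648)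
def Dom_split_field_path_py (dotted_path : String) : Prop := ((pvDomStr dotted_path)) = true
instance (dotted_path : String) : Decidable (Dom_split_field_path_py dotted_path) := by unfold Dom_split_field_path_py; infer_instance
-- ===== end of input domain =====

-- B re-decomposes A's char-by-char backtick state machine as: split on "`" (odd segments are
-- inside backticks), split even segments on "." and stitch; objective: alternative decomposition.

-- ===== PORT A =====
-- the for-loop of A, state (parts, current, in_backtick); current kept as List Char ("".join at the end)
def pvALoop : List Char → List String × List Char × Bool → List String × List Char × Bool
  | [], st => st
  | c :: l, (parts, current, in_backtick) =>
    if c = '`' then pvALoop l (parts, current, !in_backtick)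
    else if c = '.' ∧ in_backtick = false then pvALoop l (parts ++ [String.ofList current], [], in_backtick)
    else pvALoop l (parts, current ++ [c], in_backtick)

def split_field_path_py (dotted_path : String) : List String :=
  let st := pvALoop dotted_path.toList ([], [], false)
  st.1 ++ [String.ofList st.2.1]

-- ===== PORT B =====
-- the outer for-loop of Source B over enumerate(dotted_path.split("`")); str.split on a single
-- non-empty separator is List.splitOn on the char list; pieces[0] is headD [] (split is never empty)
def pvBLoop : List (List Char) → Nat → List String → List Char → List String
  | [], _, parts, current => parts ++ [String.ofList current]
  | seg :: rest, i, parts, current =>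
    if i % 2 = 1 then pvBLoop rest (i + 1) parts (current ++ seg)
    else
      let pieces := List.splitOn '.' seg
      let st := (pieces.drop 1).foldl (fun st piece => (st.1 ++ [String.ofList st.2], piece))
                  (parts, current ++ pieces.headD [])
      pvBLoop rest (i + 1) st.1 st.2

def split_field_path_py_alt (dotted_path : String) : List String :=
  pvBLoop (List.splitOn '`' dotted_path.toList) 0 [] []

-- ===== PRECONDITION & SPEC =====
def Spec_split_field_path_py (dotted_path : String) (out : List String) : Prop := out = split_field_path_py_alt dotted_path
instance (dotted_path : String) (out : List String) : Decidable (Spec_split_field_path_py dotted_path out) := by unfold Spec_split_field_path_py; infer_instance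

-- ===== CLAIM (what is proved, stated in full; the proofs are below) =====
def Claim_equal_split_field_path_py : Prop := ∀ (dotted_path : String), Dom_split_field_path_py dotted_path → Spec_split_field_path_py dotted_path (split_field_path_py dotted_path)

-- ===== LEMMAS AND PROOFS =====

lemma pvSplitOn_cons (a c : Char) (l : List Char) :
    List.splitOn a (c :: l) = if c = a then [] :: List.splitOn a l
      else (List.splitOn a l).modifyHead (List.cons c) := by
  simp [List.splitOn, List.splitOnP_cons]

lemma pvSplitOn_ne_nil (a : Char) (l : List Char) : List.splitOn a l ≠ [] :=
  List.splitOnP_ne_nil _ l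

-- an empty leading segment just advances the parity (both branches of pvBLoop do nothing on [])
lemma pvBLoop_nil_seg (ss : List (List Char)) (i : Nat) (parts : List String) (cur : List Char) :
    pvBLoop ([] :: ss) i parts cur = pvBLoop ss (i + 1) parts cur := by
  by_cases h : i % 2 = 1 <;> simp [pvBLoop, h]

-- inside backticks (odd index): a char consed onto the head segment is appended to current
lemma pvBLoop_odd_cons (c : Char) (s0 : List Char) (ss : List (List Char)) (i : Nat)
    (parts : List String) (cur : List Char) (h : i % 2 = 1) :
    pvBLoop ((c :: s0) :: ss) i parts cur = pvBLoop (s0 :: ss) i parts (cur ++ [c]) := by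
  simp [pvBLoop, h]

-- outside backticks (even index): a leading dot flushes current
lemma pvBLoop_even_dot (s0 : List Char) (ss : List (List Char)) (i : Nat)
    (parts : List String) (cur : List Char) (h : ¬ i % 2 = 1) :
    pvBLoop (('.' :: s0) :: ss) i parts cur
      = pvBLoop (s0 :: ss) i (parts ++ [String.ofList cur]) [] := by
  rcases hP : List.splitOn '.' s0 with _ | ⟨p0, ps⟩
  · exact absurd hP (pvSplitOn_ne_nil _ _)
  · simp [pvBLoop, h, pvSplitOn_cons, hP]

-- outside backticks (even index): a non-dot char consed onto the head segment extends current
lemma pvBLoop_even_cons (c : Char) (s0 : List Char) (ss : List (List Char)) (i : Nat)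
    (parts : List String) (cur : List Char) (h : ¬ i % 2 = 1) (hc : c ≠ '.') :
    pvBLoop ((c :: s0) :: ss) i parts cur = pvBLoop (s0 :: ss) i parts (cur ++ [c]) := by
  rcases hP : List.splitOn '.' s0 with _ | ⟨p0, ps⟩
  · exact absurd hP (pvSplitOn_ne_nil _ _)
  · simp [pvBLoop, h, pvSplitOn_cons, hP, hc]

-- the key simulation: A's state machine with in_backtick = parity of i equals B on the split
lemma pvKey (l : List Char) : ∀ (parts : List String) (cur : List Char) (b : Bool) (i : Nat),
    ((i % 2 = 1) ↔ b = true) →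
    (pvALoop l (parts, cur, b)).1 ++ [String.ofList (pvALoop l (parts, cur, b)).2.1]
      = pvBLoop (List.splitOn '`' l) i parts cur := by
  induction l with
  | nil =>
    intro parts cur b i hpar
    rw [show List.splitOn '`' ([] : List Char) = [[]] by
      simp [List.splitOn, List.splitOnP_nil]]
    rw [pvBLoop_nil_seg]
    simp [pvALoop, pvBLoop]
  | cons c l ih =>
    intro parts cur b i hpar
    by_cases hc : c = '`'
    · subst hc
      rw [show List.splitOn '`' ('`' :: l) = [] :: List.splitOn '`' l by
        rw [pvSplitOn_cons]; simp]
      rw [pvBLoop_nil_seg]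
      have := ih parts cur (!b) (i + 1) (by rcases b with _ | _ <;> simp_all <;> omega)
      simpa [pvALoop] using this
    · rcases hS : List.splitOn '`' l with _ | ⟨s0, ss⟩
      · exact absurd hS (pvSplitOn_ne_nil _ _)
      · rw [show List.splitOn '`' (c :: l) = (c :: s0) :: ss by
          rw [pvSplitOn_cons]; simp [hc, hS]]
        rcases b with _ | _
        · -- outside backticks
          have hi : ¬ i % 2 = 1 := by simp at hpar; omega
          by_cases hd : c = '.'
          · subst hd
            rw [pvBLoop_even_dot _ _ _ _ _ hi]
            have := ih (parts ++ [String.ofList cur]) [] false i hpar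
            rw [hS] at this
            simpa [pvALoop] using this
          · rw [pvBLoop_even_cons _ _ _ _ _ _ hi hd]
            have := ih parts (cur ++ [c]) false i hpar
            rw [hS] at this
            simpa [pvALoop, hc, hd] using this
        · -- inside backticks
          have hi : i % 2 = 1 := by simp at hpar; omega
          rw [pvBLoop_odd_cons _ _ _ _ _ _ hi]
          have := ih parts (cur ++ [c]) true i hpar
          rw [hS] at this
          simpa [pvALoop, hc] using this

-- ===== VERDICT (by name: the statement is the Claim_ definition above) =====
theorem split_field_path_py_spec : Claim_equal_split_field_path_py := by
  intro s _
  unfold Spec_split_field_path_py split_field_path_py split_field_path_py_alt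
  exact pvKey s.toList [] [] false 0 (by simp)
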